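-- pv_equiv track=rewrite | github.com/Singh-Lab/ARIES | msa_tools.py | _msa_to_column_multiset
-- ===== SOURCE A (Python) =====
-- from collections import defaultdict, Counter
--
-- def _msa_to_column_multiset(msa, gap_chars=('-', '.'), min_residues=2):
--     # min_residues=0 includes all columns, min_residues=1 includes single-res columns, min_residues=2 includes only multi-res cols
--     n_seq = len(msa)
--     L = len(msa[0])
--     assert all(len(s) == L for s in msa), "all sequences in an MSA must have equal aligned length"
--
--     counters = [-1] * n_seq  # per-sequence ungapped residue counters
--     sigs = []
--     for col in range(L):
--         sig = []
--         non_gap = 0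
--         for s_idx in range(n_seq):
--             ch = msa[s_idx][col]
--             if ch in gap_chars:
--                 sig.append(-1)
--             else:
--                 counters[s_idx] += 1
--                 sig.append(counters[s_idx])
--                 non_gap += 1
--         if non_gap >= min_residues:
--             sigs.append(tuple(sig))
--     return Counter(sigs)
-- ===== SOURCE B (Python) =====
-- from collections import Counter
--
-- def _msa_to_column_multiset(msa, gap_chars=('-', '.'), min_residues=2):
--     # min_residues=0 includes all columns, min_residues=1 includes single-res columns, min_residues=2 includes only multi-res cols
--     n_seq = len(msa)
--     L = len(msa[0])
--     assert all(len(s) == L for s in msa), "all sequences in an MSA must have equal aligned length"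
--
--     # First pass, row-major: per-sequence signature rows (-1 for gaps, running residue index otherwise)
--     sig_rows = []
--     for seq in msa:
--         c = -1
--         row = []
--         for ch in seq:
--             if ch in gap_chars:
--                 row.append(-1)
--             else:
--                 c += 1
--                 row.append(c)
--         sig_rows.append(row)
--
--     # Second pass: assemble column signatures and filter by residue count
--     sigs = []
--     for col in range(L):
--         sig = tuple(sig_rows[s][col] for s in range(n_seq))
--         non_gap = sum(1 for v in sig if v != -1)
--         if non_gap >= min_residues:
--             sigs.append(sig)
--     return Counter(sigs)
-- ===== Notes on version B (the rewrite author's own statement) =====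
-- stated objective: alternative
-- what changed: A's single column-major sweep with a mutable per-sequence counter array is replaced by a two-pass decomposition: a first row-major pass precomputes each sequence's full signature row (running ungapped residue index, -1 at gaps), and a second pass merely assembles each column's signature from those rows and counts its non -1 entries.
import Mathlib
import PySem

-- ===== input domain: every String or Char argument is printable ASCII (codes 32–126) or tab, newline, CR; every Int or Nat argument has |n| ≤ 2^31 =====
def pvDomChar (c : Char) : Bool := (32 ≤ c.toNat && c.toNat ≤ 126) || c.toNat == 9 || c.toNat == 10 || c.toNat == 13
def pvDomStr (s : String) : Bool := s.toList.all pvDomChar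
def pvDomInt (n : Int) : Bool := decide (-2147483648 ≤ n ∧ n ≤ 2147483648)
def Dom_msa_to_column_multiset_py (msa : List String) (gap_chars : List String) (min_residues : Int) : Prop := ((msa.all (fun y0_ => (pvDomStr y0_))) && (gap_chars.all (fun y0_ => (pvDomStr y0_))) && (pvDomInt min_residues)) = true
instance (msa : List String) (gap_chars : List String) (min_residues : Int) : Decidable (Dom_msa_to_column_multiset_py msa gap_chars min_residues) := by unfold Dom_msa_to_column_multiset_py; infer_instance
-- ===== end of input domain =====

-- B replaces A's column-major loop with mutable per-sequence counters by a two-pass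
-- decomposition (row-major signature rows first, then column assembly); same cost,
-- alternative structure.

-- ===== PORT A =====
-- Python 'ch in gap_chars': ch is a 1-character string compared by string equality

def pvGap (gap_chars : List String) (ch : Char) : Bool := gap_chars.contains (String.mk [ch])

-- the body of A's inner 'for s_idx in range(n_seq)' loop; state = (counters, sig, non_gap)
def pvStepA (grid : List (List Char)) (gap_chars : List String) (col : Nat)
    (st2 : List Int × List Int × Int) (s_idx : Nat) : List Int × List Int × Int :=
  if pvGap gap_chars ((grid.getD s_idx []).getD col ' ') then (st2.1, st2.2.1 ++ [(-1 : Int)], st2.2.2)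
  else (st2.1.set s_idx (st2.1.getD s_idx 0 + 1), st2.2.1 ++ [st2.1.getD s_idx 0 + 1], st2.2.2 + 1)

-- the body of A's outer 'for col in range(L)' loop; state = (counters, sigs)
def pvColStepA (grid : List (List Char)) (gap_chars : List String) (min_residues : Int)
    (st : List Int × List (List Int)) (col : Nat) : List Int × List (List Int) :=
  let inner := (List.range grid.length).foldl (pvStepA grid gap_chars col) (st.1, ([] : List Int), (0 : Int))
  (inner.1, if min_residues ≤ inner.2.2 then st.2 ++ [inner.2.1] else st.2)

-- A raises (IndexError on [], AssertionError on ragged input) where the guard is false: see Pre_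
def msa_to_column_multiset_py (msa : List String) (gap_chars : List String) (min_residues : Int) : List (List Int × Int) :=
  let L := (msa.headD "").length
  if msa.all (fun s => s.length == L) then
    let grid := msa.map String.toList
    let res := (List.range L).foldl (pvColStepA grid gap_chars min_residues)
      (List.replicate msa.length (-1 : Int), ([] : List (List Int)))
    (PySem.Dict.counter res.2).items
  else []

-- ===== PORT B =====
-- the body of B's per-sequence character loop; state = (c, row)
def pvRowStep (gap_chars : List String) (st : Int × List Int) (ch : Char) : Int × List Int :=
  if pvGap gap_chars ch then (st.1, st.2 ++ [(-1 : Int)])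
  else (st.1 + 1, st.2 ++ [st.1 + 1])

def pvSigRow (gap_chars : List String) (s : List Char) : List Int :=
  (s.foldl (pvRowStep gap_chars) ((-1 : Int), ([] : List Int))).2

-- the body of B's 'for col in range(L)' loop
def pvColStepB (sig_rows : List (List Int)) (n_seq : Nat) (min_residues : Int)
    (acc : List (List Int)) (col : Nat) : List (List Int) :=
  let sig := (List.range n_seq).map (fun s => (sig_rows.getD s []).getD col 0)
  let non_gap : Int := ((sig.filter (fun v => v != -1)).length : Int)
  if min_residues ≤ non_gap then acc ++ [sig] else acc

def msa_to_column_multiset_py_alt (msa : List String) (gap_chars : List String) (min_residues : Int) : List (List Int × Int) :=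
  let L := (msa.headD "").length
  if msa.all (fun s => s.length == L) then
    let sig_rows := msa.map (fun seq => pvSigRow gap_chars seq.toList)
    let sigs := (List.range L).foldl (pvColStepB sig_rows msa.length min_residues) []
    (PySem.Dict.counter sigs).items
  else []

-- ===== PRECONDITION & SPEC =====
-- Pre_ excludes exactly the inputs on which the Python A raises: the empty MSA (IndexError
-- on msa[0]) and MSAs whose sequences do not all have equal length (AssertionError).
def Pre_msa_to_column_multiset_py (msa : List String) (gap_chars : List String) (min_residues : Int) : Prop :=
  msa ≠ [] ∧ ∀ s ∈ msa, s.length = (msa.headD "").length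
instance (msa : List String) (gap_chars : List String) (min_residues : Int) : Decidable (Pre_msa_to_column_multiset_py msa gap_chars min_residues) := by unfold Pre_msa_to_column_multiset_py; infer_instance

def pvWitness_msa_to_column_multiset_py : List String × List String × Int := (["A-B", "A.B"], ["-", "."], 2)

def Spec_msa_to_column_multiset_py (msa : List String) (gap_chars : List String) (min_residues : Int) (out : List (List Int × Int)) : Prop := out = msa_to_column_multiset_py_alt msa gap_chars min_residues
instance (msa : List String) (gap_chars : List String) (min_residues : Int) (out : List (List Int × Int)) : Decidable (Spec_msa_to_column_multiset_py msa gap_chars min_residues out) := by unfold Spec_msa_to_column_multiset_py; infer_instance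

-- ===== CLAIM (what is proved, stated in full; the proofs are below) =====
def Claim_equal_msa_to_column_multiset_py : Prop := ∀ (msa : List String) (gap_chars : List String) (min_residues : Int), Dom_msa_to_column_multiset_py msa gap_chars min_residues → Pre_msa_to_column_multiset_py msa gap_chars min_residues → Spec_msa_to_column_multiset_py msa gap_chars min_residues (msa_to_column_multiset_py msa gap_chars min_residues)

-- ===== LEMMAS AND PROOFS =====

-- number of non-gap characters among the first c characters of a row

def pvNz (g : List String) (r : List Char) (c : Nat) : Nat :=
  (r.take c).countP (fun ch => !pvGap g ch)

-- the signature entry of row r at column col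
def pvSigAt (g : List String) (r : List Char) (col : Nat) : Int :=
  if pvGap g (r.getD col ' ') then -1 else (pvNz g r col : Int)

-- number of non-gap rows at column col
def pvNgAt (g : List String) (grid : List (List Char)) (col : Nat) : Int :=
  (grid.countP (fun r => !pvGap g (r.getD col ' ')) : Int)

-- the kept column signatures of the first c columns
def pvSigsSpec (g : List String) (grid : List (List Char)) (m : Int) (c : Nat) : List (List Int) :=
  ((List.range c).filter (fun col => decide (m ≤ pvNgAt g grid col))).map
    (fun col => grid.map (fun r => pvSigAt g r col))

lemma pvNz_succ (g : List String) (r : List Char) (col : Nat) (h : col < r.length) :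
    pvNz g r (col + 1) = pvNz g r col + (if pvGap g (r.getD col ' ') then 0 else 1) := by
  unfold pvNz
  rw [List.take_succ, List.countP_append, List.getD_eq_getElem?_getD, List.getElem?_eq_getElem h]
  simp [List.countP_cons]
  by_cases hg : pvGap g r[col] <;> simp [hg]

def pvRowList (g : List String) (c : Int) : List Char → List Int
  | [] => []
  | ch :: t => if pvGap g ch then -1 :: pvRowList g c t else (c + 1) :: pvRowList g (c + 1) t

lemma pvRowFold (g : List String) :
    ∀ (s : List Char) (c : Int) (acc : List Int),
      (s.foldl (pvRowStep g) (c, acc)).2 = acc ++ pvRowList g c s := by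
  intro s
  induction s with
  | nil => intro c acc; simp [pvRowList]
  | cons ch t ih =>
    intro c acc
    by_cases hg : pvGap g ch <;>
      simp [pvRowList, hg, List.foldl_cons, pvRowStep, ih]

lemma pvRowList_getD (g : List String) :
    ∀ (s : List Char) (c : Int) (col : Nat), col < s.length →
      (pvRowList g c s).getD col 0 =
        if pvGap g (s.getD col ' ') then -1 else c + 1 + (pvNz g s col : Int) := by
  intro s
  induction s with
  | nil => intro c col h; simp at h
  | cons ch t ih =>
    intro c col h
    cases col with
    | zero => by_cases hg : pvGap g ch <;> simp [pvRowList, hg, pvNz]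
    | succ col =>
      simp only [List.length_cons, Nat.succ_lt_succ_iff] at h
      have hnz : pvNz g (ch :: t) (col + 1) = pvNz g t col + (if pvGap g ch then 0 else 1) := by
        simp only [pvNz, List.take_succ_cons, List.countP_cons]
        by_cases hg : pvGap g ch <;> simp [hg]
      rw [List.getD_cons_succ, hnz]
      by_cases hg : pvGap g ch
      · simp only [pvRowList, hg, if_true, List.getD_cons_succ, ih c col h]
        split <;> [rfl; (push_cast; ring)]
      · simp only [pvRowList, hg, Bool.false_eq_true, if_false, List.getD_cons_succ, ih (c + 1) col h]
        split <;> [rfl; (push_cast; ring)]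

lemma pvSigRow_getD (g : List String) (s : List Char) (col : Nat) (h : col < s.length) :
    (pvSigRow g s).getD col 0 = pvSigAt g s col := by
  unfold pvSigRow pvSigAt
  rw [pvRowFold, List.nil_append, pvRowList_getD g s (-1) col h]
  split <;> simp

lemma pvInnerA (g : List String) (col : Nat) (grid : List (List Char))
    (hlen : ∀ r ∈ grid, col < r.length) :
    ∀ (rows : List (List Char)) (k : Nat) (cs sig : List Int) (ng : Int),
    grid.drop k = rows →
    cs.length = grid.length →
    (∀ j, k ≤ j → j < grid.length → cs.getD j 0 = (pvNz g (grid.getD j []) col : Int) - 1) →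
    ∃ cs',
      (List.range' k rows.length).foldl (pvStepA grid g col) (cs, sig, ng)
        = (cs', sig ++ rows.map (fun r => pvSigAt g r col),
           ng + (rows.countP (fun r => !pvGap g (r.getD col ' ')) : Int))
      ∧ cs'.length = grid.length
      ∧ (∀ j, j < grid.length →
           cs'.getD j 0 = if j < k then cs.getD j 0 else (pvNz g (grid.getD j []) (col + 1) : Int) - 1) := by
  intro rows
  induction rows with
  | nil =>
    intro k cs sig ng hdrop hcslen hinv
    refine ⟨cs, by simp, hcslen, ?_⟩
    intro j hj
    have hk : grid.length ≤ k := by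
      by_contra hlt
      push_neg at hlt
      have := List.drop_eq_nil_iff.mp hdrop
      omega
    simp [Nat.lt_of_lt_of_le hj hk]
  | cons r rest ih =>
    intro k cs sig ng hdrop hcslen hinv
    have hk : k < grid.length := by
      by_contra hge
      push_neg at hge
      rw [List.drop_eq_nil_of_le hge] at hdrop
      simp at hdrop
    have hgetk : grid.getD k [] = r := by
      rw [List.getD_eq_getElem?_getD, ← List.head?_drop, hdrop]
      rfl
    have hgrk : grid[k] = r := by
      rw [List.getD_eq_getElem?_getD, List.getElem?_eq_getElem hk] at hgetk
      exact hgetk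
    have hrmem : r ∈ grid := hgrk ▸ List.getElem_mem hk
    have hdrop' : grid.drop (k + 1) = rest := by
      have : grid.drop (k + 1) = (grid.drop k).drop 1 := by
        rw [List.drop_drop]
      rw [this, hdrop]
      rfl
    have hcol : col < r.length := hlen r hrmem
    have hrng : List.range' k (r :: rest).length = k :: List.range' (k + 1) rest.length := by
      simp [List.range'_succ]
    by_cases hg : pvGap g (r.getD col ' ')
    · -- gap at (k, col)
      obtain ⟨cs', hfold, hlen', hpt⟩ :=
        ih (k + 1) cs (sig ++ [(-1 : Int)]) ng hdrop' hcslen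
          (fun j hj hjl => hinv j (Nat.le_of_succ_le hj) hjl)
      refine ⟨cs', ?_, hlen', ?_⟩
      · rw [hrng, List.foldl_cons]
        have hstep : pvStepA grid g col (cs, sig, ng) k = (cs, sig ++ [(-1 : Int)], ng) := by
          unfold pvStepA
          rw [hgetk, if_pos hg]
        rw [hstep, hfold]
        have hsr : pvSigAt g r col = -1 := by rw [pvSigAt, if_pos hg]
        have hng : (!pvGap g (r.getD col ' ')) = false := by rw [hg]; rfl
        rw [List.map_cons, hsr, List.countP_cons, hng]
        simp
      · intro j hj
        rcases Nat.lt_trichotomy j k with hlt | heq | hgt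
        · rw [hpt j hj, if_pos (Nat.lt_succ_of_lt hlt), if_pos hlt]
        · subst heq
          rw [hpt j hj, if_pos (Nat.lt_succ_self j), if_neg (lt_irrefl j),
            hinv j (le_refl j) hj, hgetk, pvNz_succ g r col hcol, if_pos hg]
          norm_num
        · rw [hpt j hj, if_neg (by omega), if_neg (by omega)]
    · -- residue at (k, col)
      have hck : cs.getD k 0 = (pvNz g r col : Int) - 1 := by
        rw [hinv k (le_refl k) hk, hgetk]
      have hinv2 : ∀ j, k + 1 ≤ j → j < grid.length →
          (cs.set k (cs.getD k 0 + 1)).getD j 0 = (pvNz g (grid.getD j []) col : Int) - 1 := by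
        intro j hj hjl
        rw [List.getD_eq_getElem?_getD, List.getElem?_set_ne (by omega),
          ← List.getD_eq_getElem?_getD]
        exact hinv j (Nat.le_of_succ_le hj) hjl
      obtain ⟨cs', hfold, hlen', hpt⟩ :=
        ih (k + 1) (cs.set k (cs.getD k 0 + 1)) (sig ++ [cs.getD k 0 + 1]) (ng + 1)
          hdrop' (by rw [List.length_set]; exact hcslen) hinv2
      refine ⟨cs', ?_, hlen', ?_⟩
      · rw [hrng, List.foldl_cons]
        have hstep : pvStepA grid g col (cs, sig, ng) k
            = (cs.set k (cs.getD k 0 + 1), sig ++ [cs.getD k 0 + 1], ng + 1) := by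
          unfold pvStepA
          rw [hgetk, if_neg hg]
        rw [hstep, hfold]
        have hsr : pvSigAt g r col = cs.getD k 0 + 1 := by
          rw [pvSigAt, if_neg hg, hck]
          ring
        have hng : (!pvGap g (r.getD col ' ')) = true := by
          rw [Bool.not_eq_true] at hg
          rw [hg]
          rfl
        rw [List.map_cons, hsr, List.countP_cons, hng, if_pos rfl]
        refine Prod.ext rfl (Prod.ext ?_ ?_)
        · simp
        · push_cast
          ring
      · intro j hj
        rcases Nat.lt_trichotomy j k with hlt | heq | hgt
        · rw [hpt j hj, if_pos (Nat.lt_succ_of_lt hlt), if_pos hlt,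
            List.getD_eq_getElem?_getD, List.getElem?_set_ne (by omega),
            ← List.getD_eq_getElem?_getD]
        · subst heq
          rw [hpt j hj, if_pos (Nat.lt_succ_self j), if_neg (lt_irrefl j),
            List.getD_eq_getElem?_getD, List.getElem?_set_self (by omega), Option.getD_some]
          rw [hgetk, pvNz_succ g r col hcol, if_neg hg, hck]
          push_cast
          ring
        · rw [hpt j hj, if_neg (by omega), if_neg (by omega)]

lemma pvSigsSpec_succ (g : List String) (grid : List (List Char)) (m : Int) (c : Nat) :
    pvSigsSpec g grid m (c + 1) =
      if m ≤ pvNgAt g grid c then pvSigsSpec g grid m c ++ [grid.map (fun r => pvSigAt g r c)]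
      else pvSigsSpec g grid m c := by
  unfold pvSigsSpec
  rw [List.range_succ, List.filter_append, List.map_append]
  by_cases h : m ≤ pvNgAt g grid c <;> simp [h]

lemma pvOuterA (g : List String) (grid : List (List Char)) (m : Int) (L : Nat)
    (hL : ∀ r ∈ grid, r.length = L) :
    ∀ c, c ≤ L →
    ∃ cs',
      (List.range c).foldl (pvColStepA grid g m) (List.replicate grid.length (-1 : Int), []) = (cs', pvSigsSpec g grid m c)
      ∧ cs'.length = grid.length
      ∧ (∀ j, j < grid.length → cs'.getD j 0 = (pvNz g (grid.getD j []) c : Int) - 1) := by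
  intro c
  induction c with
  | zero =>
    intro _
    refine ⟨List.replicate grid.length (-1 : Int), by simp [pvSigsSpec], by simp, ?_⟩
    intro j hj
    rw [List.getD_eq_getElem?_getD, List.getElem?_replicate, if_pos hj]
    simp [pvNz]
  | succ c ihc =>
    intro hc
    obtain ⟨cs', heq, hlen', hinv⟩ := ihc (Nat.le_of_succ_le hc)
    have hcol : ∀ r ∈ grid, c < r.length := by
      intro r hr
      rw [hL r hr]
      omega
    obtain ⟨cs'', hfold, hlen'', hpt⟩ :=
      pvInnerA g c grid hcol grid 0 cs' [] 0 (List.drop_zero) hlen'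
        (fun j _ hj => hinv j hj)
    refine ⟨cs'', ?_, hlen'', ?_⟩
    · rw [List.range_succ, List.foldl_append, heq, List.foldl_cons, List.foldl_nil]
      simp only [pvColStepA]
      rw [List.range_eq_range', hfold]
      rw [pvSigsSpec_succ]
      simp [pvNgAt]
    · intro j hj
      rw [hpt j hj, if_neg (Nat.not_lt_zero j)]

lemma pvSigAt_bne (g : List String) (r : List Char) (col : Nat) :
    (pvSigAt g r col != -1) = !pvGap g (r.getD col ' ') := by
  by_cases hg : pvGap g (r.getD col ' ')
  · rw [pvSigAt, if_pos hg, hg]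
    rfl
  · have hg' := hg
    rw [Bool.not_eq_true] at hg'
    rw [pvSigAt, if_neg hg, hg']
    simp only [Bool.not_false, bne_iff_ne, ne_eq]
    omega

lemma pvColStepB_eq (g : List String) (grid : List (List Char)) (m : Int) (acc : List (List Int))
    (col : Nat) (hlen : ∀ r ∈ grid, col < r.length) :
    pvColStepB (grid.map (fun r => pvSigRow g r)) grid.length m acc col =
      if m ≤ pvNgAt g grid col then acc ++ [grid.map (fun r => pvSigAt g r col)] else acc := by
  have hsig : (List.range grid.length).map
      (fun s => ((grid.map (fun r => pvSigRow g r)).getD s []).getD col 0)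
      = grid.map (fun r => pvSigAt g r col) := by
    apply List.ext_getElem
    · simp
    · intro i h1 h2
      simp only [List.getElem_map, List.getElem_range]
      have hi : i < grid.length := by simpa using h2
      have hrow : (grid.map (fun r => pvSigRow g r)).getD i [] = pvSigRow g grid[i] := by
        rw [List.getD_eq_getElem?_getD, List.getElem?_map, List.getElem?_eq_getElem hi]
        rfl
      rw [hrow, pvSigRow_getD g grid[i] col (hlen grid[i] (List.getElem_mem hi))]
  have hcnt : (((grid.map (fun r => pvSigAt g r col)).filter (fun v => v != -1)).length : Int)
      = pvNgAt g grid col := by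
    rw [show ∀ (l : List Int), (l.filter (fun v => v != -1)).length = l.countP (fun v => v != -1)
        from fun l => List.countP_eq_length_filter.symm, List.countP_map, pvNgAt]
    congr 1
    apply List.countP_congr
    intro r _
    have h := pvSigAt_bne g r col
    simp only [Function.comp_apply, h, Bool.not_eq_true']
  simp only [pvColStepB]
  rw [hsig, hcnt]

lemma pvOuterB (g : List String) (grid : List (List Char)) (m : Int) (L : Nat)
    (hL : ∀ r ∈ grid, r.length = L) :
    ∀ c, c ≤ L →
    (List.range c).foldl (pvColStepB (grid.map (fun r => pvSigRow g r)) grid.length m) []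
      = pvSigsSpec g grid m c := by
  intro c
  induction c with
  | zero => intro _; simp [pvSigsSpec]
  | succ c ihc =>
    intro hc
    rw [List.range_succ, List.foldl_append, ihc (Nat.le_of_succ_le hc), List.foldl_cons,
      List.foldl_nil, pvColStepB_eq g grid m _ c
        (fun r hr => by rw [hL r hr]; omega),
      pvSigsSpec_succ]

lemma pvPortsEq (msa : List String) (gap_chars : List String) (min_residues : Int)
    (hall : msa.all (fun s => s.length == (msa.headD "").length) = true) :
    msa_to_column_multiset_py msa gap_chars min_residues
      = msa_to_column_multiset_py_alt msa gap_chars min_residues := by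
  unfold msa_to_column_multiset_py msa_to_column_multiset_py_alt
  · rw [if_pos hall, if_pos hall]
    dsimp only
    have hL : ∀ r ∈ msa.map String.toList, r.length = (msa.headD "").length := by
      intro r hr
      rw [List.mem_map] at hr
      obtain ⟨s, hs, rfl⟩ := hr
      rw [List.all_eq_true] at hall
      have := hall s hs
      simpa using this
    have hlen : (msa.map String.toList).length = msa.length := by simp
    obtain ⟨cs', hA, _, _⟩ :=
      pvOuterA gap_chars (msa.map String.toList) min_residues (msa.headD "").length hL
        (msa.headD "").length (le_refl _)
    have hB :=
      pvOuterB gap_chars (msa.map String.toList) min_residues (msa.headD "").length hL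
        (msa.headD "").length (le_refl _)
    rw [List.map_map] at hB
    have hcomp : (pvSigRow gap_chars ∘ String.toList) = (fun seq => pvSigRow gap_chars seq.toList) := rfl
    rw [hcomp] at hB
    rw [hlen] at hA hB
    rw [hA, hB]

-- ===== VERDICT (by name: the statement is the Claim_ definition above) =====
theorem msa_to_column_multiset_py_spec : Claim_equal_msa_to_column_multiset_py := by
  intro msa gap_chars min_residues _ hpre
  unfold Spec_msa_to_column_multiset_py
  refine pvPortsEq msa gap_chars min_residues ?_
  rw [List.all_eq_true]
  intro s hs
  exact (beq_iff_eq).mpr (hpre.2 s hs)
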